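-- pv_equiv track=rewrite | github.com/FundamentosProgramacion-201713/Tarea-07 | tarea7.py | calcularAcumulacion
-- ===== SOURCE A (Python) =====
-- def calcularAcumulacion(acumulacion):
--     lista=[]
--     lista.append(acumulacion[0])
--     i=0
--     desfase=0
--     while i<len(acumulacion)-1:
--         valor=acumulacion[i]+acumulacion[i+1]+desfase
--         lista.append(valor)
--         i+=1
--         desfase+=i
--     return lista
-- ===== SOURCE B (Python) =====
-- def calcularAcumulacion(acumulacion):
--     lista = [acumulacion[0]]
--     for k in range(1, len(acumulacion)):
--         lista.append(acumulacion[k - 1] + acumulacion[k] + (k - 1) * k // 2)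
--     return lista
-- ===== Notes on version B (the rewrite author's own statement) =====
-- stated objective: simpler
-- what changed: Replaces the running 'desfase' accumulator and manual index stepping of the while loop by a direct per-index formula: element k is acumulacion[k-1] + acumulacion[k] + (k-1)*k//2 (triangular offset in closed form).
import Mathlib
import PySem

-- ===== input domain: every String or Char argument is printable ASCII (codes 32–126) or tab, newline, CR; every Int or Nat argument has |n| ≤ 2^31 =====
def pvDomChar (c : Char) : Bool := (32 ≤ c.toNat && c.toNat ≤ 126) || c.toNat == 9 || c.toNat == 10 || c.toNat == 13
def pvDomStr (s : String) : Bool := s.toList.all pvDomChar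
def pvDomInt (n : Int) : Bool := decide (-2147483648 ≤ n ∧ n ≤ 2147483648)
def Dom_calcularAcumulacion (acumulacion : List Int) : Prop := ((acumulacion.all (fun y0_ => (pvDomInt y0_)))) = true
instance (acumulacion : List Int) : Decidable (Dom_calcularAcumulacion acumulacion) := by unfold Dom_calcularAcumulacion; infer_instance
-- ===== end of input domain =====

-- B replaces A's running `desfase` accumulator and manual index stepping by a direct
-- per-index closed-form offset (k-1)*k//2 — a simpler, accumulator-free decomposition.

-- ===== PORT A =====
-- step of A's while loop: state = (lista, desfase); loop variable i runs 0 .. len-2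
def pvStepA (acumulacion : List Int) (st : List Int × Int) (i : Int) : List Int × Int :=
  let valor := PySem.List.pyGetD acumulacion i 0 + PySem.List.pyGetD acumulacion (i + 1) 0 + st.2
  (st.1 ++ [valor], st.2 + (i + 1))

def calcularAcumulacion (acumulacion : List Int) : List Int :=
  match PySem.List.pyGet? acumulacion 0 with
  | none => []   -- acumulacion[0] raises IndexError on []; excluded by Pre_
  | some a0 =>
    ((PySem.List.pyRange 0 ((acumulacion.length : Int) - 1) 1).foldl
        (pvStepA acumulacion) ([a0], 0)).1

-- ===== PORT B =====
def calcularAcumulacion_alt (acumulacion : List Int) : List Int :=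
  match PySem.List.pyGet? acumulacion 0 with
  | none => []   -- acumulacion[0] raises IndexError on []; excluded by Pre_
  | some a0 =>
    (PySem.List.pyRange 1 (acumulacion.length : Int) 1).foldl
      (fun lista k =>
        lista ++ [PySem.List.pyGetD acumulacion (k - 1) 0 + PySem.List.pyGetD acumulacion k 0
                    + PySem.Int.floordiv ((k - 1) * k) 2])
      [a0]

-- ===== PRECONDITION & SPEC =====
-- A raises IndexError on the empty list (acumulacion[0]); that input is excluded.
def Pre_calcularAcumulacion (acumulacion : List Int) : Prop := acumulacion ≠ []
instance (acumulacion : List Int) : Decidable (Pre_calcularAcumulacion acumulacion) := by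
  unfold Pre_calcularAcumulacion; infer_instance
def pvWitness_calcularAcumulacion : List Int := [3, 1, 4, 1, 5]

def Spec_calcularAcumulacion (acumulacion : List Int) (out : List Int) : Prop := out = calcularAcumulacion_alt acumulacion
instance (acumulacion : List Int) (out : List Int) : Decidable (Spec_calcularAcumulacion acumulacion out) := by unfold Spec_calcularAcumulacion; infer_instance

-- ===== CLAIM (what is proved, stated in full; the proofs are below) =====
def Claim_equal_calcularAcumulacion : Prop := ∀ (acumulacion : List Int), Dom_calcularAcumulacion acumulacion → Pre_calcularAcumulacion acumulacion → Spec_calcularAcumulacion acumulacion (calcularAcumulacion acumulacion)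

-- ===== LEMMAS AND PROOFS =====

-- A's desfase after k loop iterations: 0 + 1 + 2 + … + k
def pvDesf : Nat → Int
  | 0 => 0
  | k + 1 => pvDesf k + (k + 1)

theorem pvDesf_closed (k : Nat) : 2 * pvDesf k = (k : Int) * (k + 1) := by
  induction k with
  | zero => simp [pvDesf]
  | succ k ih => simp only [pvDesf]; push_cast; push_cast at ih; ring_nf; ring_nf at ih; omega

-- the fold of A's loop body, in closed form
theorem pvFoldA (a : List Int) (l : List Int) (m : Nat) :
    ((List.range m).map (fun (k : Nat) => (0 : Int) + (k : Int))).foldl (pvStepA a) (l, 0)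
      = (l ++ (List.range m).map
          (fun (k : Nat) => PySem.List.pyGetD a (k : Int) 0 + PySem.List.pyGetD a ((k : Int) + 1) 0 + pvDesf k),
         pvDesf m) := by
  induction m with
  | zero => simp [pvDesf]
  | succ m ih =>
    rw [List.range_succ, List.map_append, List.foldl_append, ih]
    simp [pvStepA, pvDesf]

theorem pvDesf_eq_floordiv (k : Nat) :
    pvDesf k = PySem.Int.floordiv ((k : Int) * ((k : Int) + 1)) 2 := by
  rw [PySem.Int.floordiv_eq_ediv_of_pos (by omega),
    (pvDesf_closed k).symm,
    Int.mul_ediv_cancel_left _ (by norm_num)]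

-- ===== VERDICT (by name: the statement is the Claim_ definition above) =====
theorem calcularAcumulacion_spec : Claim_equal_calcularAcumulacion := by
  unfold Claim_equal_calcularAcumulacion
  intro a _ hpre
  unfold Spec_calcularAcumulacion calcularAcumulacion calcularAcumulacion_alt
  have hlen : a.length ≠ 0 := by simpa using fun h => hpre (List.eq_nil_of_length_eq_zero h)
  cases hget : PySem.List.pyGet? a 0 with
  | none => rfl
  | some a0 =>
    simp only [PySem.List.pyRange_one, PySem.List.foldl_append_singleton_eq_map]
    rw [show (a.length : Int) - 1 - 0 = (a.length : Int) - 1 from by ring, pvFoldA]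
    simp only [List.map_map, Function.comp_def]
    congr 1
    apply List.map_congr_left
    intro k hk
    rw [show 1 + (k : Int) - 1 = (k : Int) from by ring,
      show 1 + (k : Int) = (k : Int) + 1 from by ring, pvDesf_eq_floordiv]
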